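-- pv_equiv track=rewrite | github.com/coolzhang666/search-engine | Exercise/exercise4/k_shingle.py | getShingle
-- ===== SOURCE A (Python) =====
-- def getShingle(s, k):
--     dic = dict()
--     for i in range(0, len(s) - k + 1):
--         s1 = s[i:i + k]
--         j = dic.get(s1)
--         if j:
--             dic[s1] += 1
--         else:
--             dic[s1] = 1
--     return dic
-- ===== SOURCE B (Python) =====
-- def getShingle(s, k):
--     # no counting dict at all: dedup the shingle stream in order, then count each distinct key
--     shingles = [s[i:i + k] for i in range(len(s) - k + 1)]
--     seen = []
--     for sh in shingles:
--         if sh not in seen: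
--             seen.append(sh)
--     return {key: shingles.count(key) for key in seen}
-- ===== Notes on version B (the rewrite author's own statement) =====
-- stated objective: alternative
-- what changed: The incremental dict counter (get, branch, insert per shingle) disappears entirely: B materialises the shingle list, dedups it into the first-occurrence key order, and computes each key's value by an independent list.count scan over the shingle list.
import Mathlib
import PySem

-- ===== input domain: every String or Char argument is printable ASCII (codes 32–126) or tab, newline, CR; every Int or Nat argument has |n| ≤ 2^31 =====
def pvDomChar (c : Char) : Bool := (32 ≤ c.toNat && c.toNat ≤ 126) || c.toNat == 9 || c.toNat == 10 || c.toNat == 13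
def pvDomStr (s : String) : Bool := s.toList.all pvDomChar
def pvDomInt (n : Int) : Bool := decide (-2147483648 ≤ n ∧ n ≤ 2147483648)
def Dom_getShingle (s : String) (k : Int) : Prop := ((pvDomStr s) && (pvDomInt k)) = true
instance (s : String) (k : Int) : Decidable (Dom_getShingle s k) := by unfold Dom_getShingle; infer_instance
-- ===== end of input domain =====

-- B drops A's incremental dict counter: it dedups the shingle list into first-occurrence
-- key order and counts each distinct key by an independent list.count scan (alternative).

-- ===== PORT A =====
-- one loop step: s1 = s[i:i+k]; j = dic.get(s1); if j: dic[s1] += 1 else: dic[s1] = 1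
def getShingleStep (s : String) (k : Int) (d : PySem.Dict String Int) (i : Int) : PySem.Dict String Int :=
  let s1 := String.ofList (PySem.List.slice s.toList (some i) (some (i + k)))
  match d.get? s1 with
  | some j => if j ≠ 0 then d.insert s1 (j + 1) else d.insert s1 1  -- `if j:` — truthy iff nonzero
  | none => d.insert s1 1

def getShingle (s : String) (k : Int) : List (String × Int) :=
  ((PySem.List.pyRange 0 (PySem.Str.len s - k + 1) 1).foldl (getShingleStep s k) PySem.Dict.empty).items

-- ===== PORT B =====
def getShingle_alt (s : String) (k : Int) : List (String × Int) :=
  let shingles := (PySem.List.pyRange 0 (PySem.Str.len s - k + 1) 1).map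
    (fun i => String.ofList (PySem.List.slice s.toList (some i) (some (i + k))))
  -- seen: append each shingle not yet present (ordered dedup)
  let seen := shingles.foldl PySem.Set.add PySem.Set.empty
  -- {key: shingles.count(key) for key in seen}
  seen.map (fun key => (key, (shingles.count key : Int)))

-- ===== PRECONDITION & SPEC =====
def Spec_getShingle (s : String) (k : Int) (out : List (String × Int)) : Prop := out = getShingle_alt s k
instance (s : String) (k : Int) (out : List (String × Int)) : Decidable (Spec_getShingle s k out) := by unfold Spec_getShingle; infer_instance

-- ===== CLAIM (what is proved, stated in full; the proofs are below) =====
def Claim_equal_getShingle : Prop := ∀ (s : String) (k : Int), Dom_getShingle s k → Spec_getShingle s k (getShingle s k)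

-- ===== LEMMAS AND PROOFS =====

-- invariant of A's loop: every stored count is positive
def PosVals (d : PySem.Dict String Int) : Prop := ∀ x j, d.get? x = some j → 0 < j

lemma posVals_empty : PosVals (PySem.Dict.empty : PySem.Dict String Int) := by
  intro x j h; simp [PySem.Dict.get?_empty] at h

lemma posVals_insert (d : PySem.Dict String Int) (hd : PosVals d) (x : String) :
    PosVals (d.insert x (d.getD x 0 + 1)) := by
  intro y j h
  rw [PySem.Dict.get?_insert] at h
  split at h
  · cases h
    rcases hk : d.get? x with _ | v
    · simp [PySem.Dict.getD_eq_get?_getD, hk]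
    · have := hd x v hk
      simp [PySem.Dict.getD_eq_get?_getD, hk]; omega
  · exact hd y j h

-- under the invariant, A's branchy step is exactly the counter step
lemma step_eq (s : String) (k : Int) (d : PySem.Dict String Int) (hd : PosVals d) (i : Int) :
    getShingleStep s k d i =
      d.insert (String.ofList (PySem.List.slice s.toList (some i) (some (i + k))))
        (d.getD (String.ofList (PySem.List.slice s.toList (some i) (some (i + k)))) 0 + 1) := by
  unfold getShingleStep
  set s1 := String.ofList (PySem.List.slice s.toList (some i) (some (i + k)))
  rcases hk : d.get? s1 with _ | j
  · simp [PySem.Dict.getD_eq_get?_getD, hk]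
  · have hj0 : j ≠ 0 := by have := hd s1 j hk; omega
    simp [PySem.Dict.getD_eq_get?_getD, hk, hj0]

-- A's fold over indices equals the counter fold over the shingle values
lemma fold_eq (s : String) (k : Int) (l : List Int) (d : PySem.Dict String Int) (hd : PosVals d) :
    l.foldl (getShingleStep s k) d =
      (l.map (fun i => String.ofList (PySem.List.slice s.toList (some i) (some (i + k))))).foldl
        (fun d x => d.insert x (d.getD x 0 + 1)) d := by
  induction l generalizing d with
  | nil => rfl
  | cons i t ih =>
    simp only [List.foldl_cons, List.map_cons]
    rw [step_eq s k d hd i]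
    exact ih _ (posVals_insert d hd _)

-- ===== VERDICT (by name: the statement is the Claim_ definition above) =====
theorem getShingle_spec : Claim_equal_getShingle := by
  intro s k _
  unfold Spec_getShingle getShingle getShingle_alt
  rw [fold_eq s k _ _ posVals_empty,
      PySem.Dict.foldl_insert_getD_add_one_eq_counter,
      PySem.Dict.items_counter]
  rfl
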